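-- pv_equiv track=rewrite | github.com/Yondu715/hw | 4sem/IS/lab5/14.py | recursive_len
-- ===== SOURCE A (Python) =====
-- def recursive_len(some_list):
--     tmp = 0
--     if some_list:
--         tmp += 1
--     else:
--         return 0
--     some_list.pop()
--     count = tmp + recursive_len(some_list)
--     return count
-- ===== SOURCE B (Python) =====
-- def recursive_len(some_list):
--     count = 0
--     while some_list:
--         some_list.pop()
--         count += 1
--     return count
-- ===== Notes on version B (the rewrite author's own statement) =====
-- stated objective: simpler
-- what changed: Replaces the recursive pop-and-recurse definition with a plain iterative while-loop that pops and counts; same return value and same side effect of emptying the list.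
import Mathlib
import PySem

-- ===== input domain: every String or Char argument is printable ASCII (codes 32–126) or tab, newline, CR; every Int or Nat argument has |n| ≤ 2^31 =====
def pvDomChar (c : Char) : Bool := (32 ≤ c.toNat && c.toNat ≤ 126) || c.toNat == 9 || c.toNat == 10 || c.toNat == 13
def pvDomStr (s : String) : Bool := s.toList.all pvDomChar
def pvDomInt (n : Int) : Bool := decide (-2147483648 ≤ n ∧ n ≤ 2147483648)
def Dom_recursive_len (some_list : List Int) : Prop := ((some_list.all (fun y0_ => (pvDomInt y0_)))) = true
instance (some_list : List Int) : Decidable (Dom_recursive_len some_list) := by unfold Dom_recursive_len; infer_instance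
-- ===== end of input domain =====

-- B replaces the recursion with an iterative pop-and-count loop (same result, no recursion depth).
-- Both Pythons empty the input list in place; the equivalence proved here is about the RETURN value.

-- ===== PORT A =====
-- A: if the list is empty return 0, else pop the last element and return 1 + recursive call.
def recursive_len (some_list : List Int) : Int :=
  match some_list with
  | [] => 0
  | a :: l =>
    1 + recursive_len (a :: l).dropLast
termination_by some_list.length
decreasing_by simp

-- ===== PORT B =====
-- B: while-loop with an accumulator, popping the last element each iteration.
def recursive_len_alt_loop (some_list : List Int) (count : Int) : Int :=
  match some_list with
  | [] => count
  | a :: l =>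
    recursive_len_alt_loop ((a :: l).dropLast) (count + 1)
termination_by some_list.length
decreasing_by simp

def recursive_len_alt (some_list : List Int) : Int :=
  recursive_len_alt_loop some_list 0

-- ===== PRECONDITION & SPEC =====
def Spec_recursive_len (some_list : List Int) (out : Int) : Prop := out = recursive_len_alt some_list
instance (some_list : List Int) (out : Int) : Decidable (Spec_recursive_len some_list out) := by unfold Spec_recursive_len; infer_instance

-- ===== CLAIM (what is proved, stated in full; the proofs are below) =====
def Claim_equal_recursive_len : Prop := ∀ (some_list : List Int), Dom_recursive_len some_list → Spec_recursive_len some_list (recursive_len some_list)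

-- ===== LEMMAS AND PROOFS =====
theorem recursive_len_alt_loop_acc (some_list : List Int) (count : Int) :
    recursive_len_alt_loop some_list count = count + recursive_len some_list := by
  induction some_list using recursive_len.induct generalizing count with
  | case1 => simp [recursive_len_alt_loop, recursive_len]
  | case2 a l ih =>
    rw [recursive_len_alt_loop, recursive_len]
    rw [ih]; ring

-- ===== VERDICT (by name: the statement is the Claim_ definition above) =====
theorem recursive_len_spec : Claim_equal_recursive_len := by
  intro l _
  unfold Spec_recursive_len recursive_len_alt
  rw [recursive_len_alt_loop_acc]
  ring
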